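-- pv_equiv track=rewrite | github.com/SrivarmaBattini/Competitive-Programming | 4051-remove-zeros-in-decimal-representation/4051-remove-zeros-in-decimal-representation.py | removeZeros
-- ===== SOURCE A (Python) =====
-- def removeZeros(n: int) -> int:
--
--     res = ""
--     for s in str(n):
--         if s == "0":
--             continue
--         else:
--             res += s
--
--     return int(res) if res else None
-- ===== SOURCE B (Python) =====
-- def removeZeros(n: int) -> int:
--     # integer arithmetic: strip zero digits of |n| least-significant-first,
--     # compressing the kept digits with a place-value multiplier
--     if n == 0:
--         return None
--     sign = -1 if n < 0 else 1
--     m = abs(n)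
--     res = 0
--     mult = 1
--     while m > 0:
--         m, d = divmod(m, 10)
--         if d != 0:
--             res += d * mult
--             mult *= 10
--     return sign * res
-- ===== Notes on version B (the rewrite author's own statement) =====
-- stated objective: alternative
-- what changed: Replaces string conversion, character filtering and re-parsing with pure integer arithmetic: a divmod loop over |n| that skips zero digits and recombines the kept digits with a place-value multiplier, handling sign and the n==0/None case arithmetically.
import Mathlib
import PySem

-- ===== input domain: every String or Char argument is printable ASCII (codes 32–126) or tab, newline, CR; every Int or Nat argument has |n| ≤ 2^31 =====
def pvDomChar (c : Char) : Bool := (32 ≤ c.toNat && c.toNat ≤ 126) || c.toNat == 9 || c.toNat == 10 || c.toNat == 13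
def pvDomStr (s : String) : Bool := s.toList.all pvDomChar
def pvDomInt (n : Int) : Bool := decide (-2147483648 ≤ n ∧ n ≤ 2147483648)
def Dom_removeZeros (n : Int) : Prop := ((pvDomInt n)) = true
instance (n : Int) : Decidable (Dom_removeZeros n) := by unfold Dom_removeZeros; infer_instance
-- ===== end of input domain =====

-- B replaces A's build-a-string-and-reparse traversal with a pure divmod loop over |n|
-- (objective: alternative; same cost, no string round-trip).

-- ===== PORT A =====
-- Hand port of `int(res)`: exact on the strings A actually builds, which are always a
-- nonempty run of digit characters optionally preceded by '-' (res comes from str(n)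
-- with its '0' characters removed; the leading digit of |n| is never '0').
def pyParseDigits : List Char → Nat → Nat
  | [], acc => acc
  | c :: cs, acc => pyParseDigits cs (acc * 10 + (c.toNat - 48))

def pyIntCanon (cs : List Char) : Option Int :=
  if cs.head? = some '-' then some (-(pyParseDigits (cs.drop 1) 0 : Int))
  else some ((pyParseDigits cs 0 : Int))

def removeZeros (n : Int) : Option Int :=
  let res := (PySem.Int.toChars n).foldl (fun acc s => if s = '0' then acc else acc ++ [s]) []
  if res = [] then none else pyIntCanon res

-- ===== PORT B =====
def altLoop (m res mult : Nat) : Nat :=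
  if m = 0 then res
  else
    let d := m % 10
    let m' := m / 10
    if d ≠ 0 then altLoop m' (res + d * mult) (mult * 10) else altLoop m' res mult
termination_by m
decreasing_by all_goals exact Nat.div_lt_self (Nat.pos_of_ne_zero (by assumption)) (by norm_num)

def removeZeros_alt (n : Int) : Option Int :=
  if n = 0 then none
  else
    let sign : Int := if n < 0 then -1 else 1
    some (sign * (altLoop n.natAbs 0 1 : Int))

-- ===== PRECONDITION & SPEC =====
def Spec_removeZeros (n : Int) (out : Option Int) : Prop := out = removeZeros_alt n
instance (n : Int) (out : Option Int) : Decidable (Spec_removeZeros n out) := by unfold Spec_removeZeros; infer_instance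

-- ===== CLAIM (what is proved, stated in full; the proofs are below) =====
def Claim_equal_removeZeros : Prop := ∀ (n : Int), Dom_removeZeros n → Spec_removeZeros n (removeZeros n)

-- ===== LEMMAS AND PROOFS =====

-- MSF decimal digit characters of m ([] for 0); proof-side mirror of Nat.toDigits 10.
def dstr (m : Nat) : List Char :=
  if m = 0 then [] else dstr (m / 10) ++ [Nat.digitChar (m % 10)]
termination_by m
decreasing_by exact Nat.div_lt_self (Nat.pos_of_ne_zero (by assumption)) (by norm_num)

lemma tdc (fuel : Nat) : ∀ m ds, 0 < m → m < fuel →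
    Nat.toDigitsCore 10 fuel m ds = dstr m ++ ds := by
  induction fuel with
  | zero => intro m ds hm hf; omega
  | succ f ih =>
    intro m ds hm hf
    have hstep : Nat.toDigitsCore 10 (f + 1) m ds =
        if m / 10 = 0 then (m % 10).digitChar :: ds
        else Nat.toDigitsCore 10 f (m / 10) ((m % 10).digitChar :: ds) := rfl
    rw [hstep]
    by_cases h : m / 10 = 0
    · rw [if_pos h]
      conv_rhs => rw [dstr, if_neg (by omega)]
      rw [dstr, h, if_pos rfl]
      simp
    · rw [if_neg h, ih (m / 10) _ (Nat.pos_of_ne_zero h)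
        (by have := Nat.div_lt_self hm (show 1 < 10 by norm_num); omega)]
      conv_rhs => rw [dstr, if_neg (by omega)]
      simp

lemma toDigits_eq_dstr (m : Nat) (hm : 0 < m) : Nat.toDigits 10 m = dstr m := by
  rw [Nat.toDigits, tdc (m + 1) m [] hm (by omega)]
  simp

lemma foldl_filter (l : List Char) : ∀ a,
    l.foldl (fun acc s => if s = '0' then acc else acc ++ [s]) a
      = a ++ l.filter (fun s => !(s == '0')) := by
  induction l with
  | nil => intro a; simp
  | cons c t ih =>
    intro a
    by_cases h : c = '0'
    · simp [List.foldl, h, ih]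
    · simp [List.foldl, h, ih]

lemma digitChar_ne_dash (d : Nat) (hd : d < 10) : Nat.digitChar d ≠ '-' := by
  interval_cases d <;> decide

lemma digitChar_eq_zero_iff (d : Nat) (hd : d < 10) :
    (Nat.digitChar d = '0') ↔ d = 0 := by
  interval_cases d <;> decide

lemma digitChar_val (d : Nat) (hd : d < 10) : (Nat.digitChar d).toNat - 48 = d := by
  interval_cases d <;> decide

lemma mem_dstr (m : Nat) : ∀ c ∈ dstr m, ∃ d, d < 10 ∧ c = Nat.digitChar d := by
  induction m using Nat.strong_induction_on with
  | _ m ih =>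
    intro c hc
    by_cases h : m = 0
    · rw [dstr, if_pos h] at hc; simp at hc
    · rw [dstr, if_neg h] at hc
      rcases List.mem_append.1 hc with h1 | h1
      · exact ih (m / 10) (Nat.div_lt_self (Nat.pos_of_ne_zero h) (by norm_num)) c h1
      · simp at h1
        exact ⟨m % 10, Nat.mod_lt _ (by norm_num), h1⟩

-- abbreviation for the filtered digit string
def F (m : Nat) : List Char := (dstr m).filter (fun s => !(s == '0'))

lemma F_step_zero (m : Nat) (hm : m ≠ 0) (h : m % 10 = 0) : F m = F (m / 10) := by
  unfold F
  conv_lhs => rw [dstr, if_neg hm]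
  rw [List.filter_append]
  simp [h, Nat.digitChar]

lemma F_step_nonzero (m : Nat) (hm : m ≠ 0) (h : m % 10 ≠ 0) :
    F m = F (m / 10) ++ [Nat.digitChar (m % 10)] := by
  unfold F
  conv_lhs => rw [dstr, if_neg hm]
  rw [List.filter_append]
  have : Nat.digitChar (m % 10) ≠ '0' := by
    rw [Ne, digitChar_eq_zero_iff _ (Nat.mod_lt _ (by norm_num))]; exact h
  simp [this]

lemma altLoop_step (m res mult : Nat) (h : m ≠ 0) :
    altLoop m res mult =
      if m % 10 ≠ 0 then altLoop (m / 10) (res + m % 10 * mult) (mult * 10)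
      else altLoop (m / 10) res mult := by
  rw [altLoop, if_neg h]

lemma altLoop_general (m : Nat) : ∀ res mult,
    altLoop m res mult = res + mult * altLoop m 0 1 := by
  induction m using Nat.strong_induction_on with
  | _ m ih =>
    intro res mult
    by_cases h : m = 0
    · subst h; simp [altLoop]
    · have hlt : m / 10 < m := Nat.div_lt_self (Nat.pos_of_ne_zero h) (by norm_num)
      rw [altLoop_step m res mult h, altLoop_step m 0 1 h]
      by_cases hd : m % 10 = 0
      · rw [if_neg (by omega), if_neg (by omega)]
        rw [ih _ hlt res mult, ih _ hlt 0 1]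
      · rw [if_pos (by omega), if_pos (by omega)]
        rw [ih _ hlt (res + m % 10 * mult) (mult * 10), ih _ hlt (0 + m % 10 * 1) (1 * 10)]
        ring

lemma pyParseDigits_append (xs : List Char) : ∀ ys acc,
    pyParseDigits (xs ++ ys) acc = pyParseDigits ys (pyParseDigits xs acc) := by
  induction xs with
  | nil => intro ys acc; simp [pyParseDigits]
  | cons c t ih => intro ys acc; simp [pyParseDigits, ih]

lemma parse_F (m : Nat) : ∀ acc,
    pyParseDigits (F m) acc = acc * 10 ^ (F m).length + altLoop m 0 1 := by
  induction m using Nat.strong_induction_on with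
  | _ m ih =>
    intro acc
    by_cases h : m = 0
    · subst h
      have : F 0 = [] := by unfold F; rw [dstr]; simp
      rw [this, altLoop]
      simp [pyParseDigits]
    · have hlt : m / 10 < m := Nat.div_lt_self (Nat.pos_of_ne_zero h) (by norm_num)
      by_cases hd : m % 10 = 0
      · rw [F_step_zero m h hd, ih _ hlt acc]
        conv_rhs => rw [altLoop, if_neg h]
        simp [hd]
      · rw [F_step_nonzero m h hd, pyParseDigits_append]
        rw [ih _ hlt acc]
        simp only [pyParseDigits]
        rw [digitChar_val _ (Nat.mod_lt _ (by norm_num))]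
        conv_rhs => rw [altLoop, if_neg h]
        simp only [ne_eq, hd, not_false_eq_true, if_pos]
        rw [altLoop_general (m / 10) (0 + m % 10 * 1) (1 * 10),
            List.length_append]
        simp only [List.length_cons, List.length_nil]
        ring

lemma F_ne_nil (m : Nat) : m ≠ 0 → F m ≠ [] := by
  induction m using Nat.strong_induction_on with
  | _ m ih =>
    intro hm
    by_cases hd : m % 10 = 0
    · rw [F_step_zero m hm hd]
      exact ih (m / 10) (Nat.div_lt_self (Nat.pos_of_ne_zero hm) (by norm_num)) (by omega)
    · rw [F_step_nonzero m hm hd]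
      simp

lemma mem_F_digit (m : Nat) (c : Char) (hc : c ∈ F m) : ∃ d, d < 10 ∧ c = Nat.digitChar d := by
  unfold F at hc
  exact mem_dstr m c (List.mem_filter.1 hc).1

lemma pyIntCanon_digits (cs : List Char) (hne : cs ≠ [])
    (hdig : ∀ c ∈ cs, ∃ d, d < 10 ∧ c = Nat.digitChar d) :
    pyIntCanon cs = some ((pyParseDigits cs 0 : Nat) : Int) := by
  cases cs with
  | nil => exact absurd rfl hne
  | cons c t =>
    obtain ⟨d, hd, hcd⟩ := hdig c (by simp)
    have hcn : c ≠ '-' := by rw [hcd]; exact digitChar_ne_dash d hd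
    rw [pyIntCanon, if_neg (by simp [hcn])]

-- the positive-m core: A's filtered-parse equals B's loop value
lemma core (m : Nat) (hm : m ≠ 0) :
    (if F m = [] then none else pyIntCanon (F m))
      = some ((altLoop m 0 1 : Nat) : Int) := by
  rw [if_neg (F_ne_nil m hm), pyIntCanon_digits (F m) (F_ne_nil m hm) (mem_F_digit m)]
  rw [parse_F m 0]
  simp

-- ===== VERDICT (by name: the statement is the Claim_ definition above) =====
theorem removeZeros_spec : Claim_equal_removeZeros := by
  intro n _
  unfold Spec_removeZeros removeZeros removeZeros_alt
  by_cases h0 : n = 0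
  · subst h0; decide
  · simp only [if_neg h0]
    have hm : n.natAbs ≠ 0 := by omega
    rcases lt_trichotomy n 0 with hn | hn | hn
    · simp only [PySem.Int.toChars, if_pos hn]
      rw [toDigits_eq_dstr _ (Nat.pos_of_ne_zero hm)]
      rw [show ('-' :: dstr n.natAbs) = ['-'] ++ dstr n.natAbs from rfl,
          List.foldl_append, foldl_filter, foldl_filter]
      simp only [List.nil_append]
      rw [show List.filter (fun s => !(s == '0')) ['-'] = ['-'] from by decide]
      rw [show (List.filter (fun s => !(s == '0')) (dstr n.natAbs)) = F n.natAbs from rfl]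
      rw [if_neg (show ¬ (['-'] ++ F n.natAbs = []) from by simp)]
      rw [pyIntCanon, if_pos (by simp)]
      rw [show List.drop 1 (['-'] ++ F n.natAbs) = F n.natAbs from rfl]
      rw [parse_F n.natAbs 0]
      simp
    · omega
    · simp only [PySem.Int.toChars, if_neg (show ¬ n < 0 from by omega)]
      rw [show n.toNat = n.natAbs from by omega]
      rw [toDigits_eq_dstr _ (Nat.pos_of_ne_zero hm), foldl_filter]
      simp only [List.nil_append]
      rw [show (List.filter (fun s => !(s == '0')) (dstr n.natAbs)) = F n.natAbs from rfl]
      rw [core n.natAbs hm]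
      simp
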